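-- pv_equiv track=rewrite | github.com/haruhi-medical/robby-the-match | scripts/generate_salary_data.py | get_sample_jobs
-- ===== SOURCE A (Python) =====
-- def get_sample_jobs(jobs_with_salary, n=3):
--     """上位3件の具体求人を取得（給与上限が高い順）"""
--     sorted_jobs = sorted(
--         jobs_with_salary,
--         key=lambda x: x[1][1],  # salary_high
--         reverse=True
--     )
--     samples = []
--     seen_employers = set()
--     for job, (sal_low, sal_high) in sorted_jobs:
--         employer = job.get("employer", "").strip()
--         if employer in seen_employers:
--             continue  # 同一雇用主の重複を排除
--         seen_employers.add(employer)
--         samples.append({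
--             "employer": employer,
--             "salary_range": f"{sal_low:,}円～{sal_high:,}円",
--             "employment_type": job.get("employment_type", ""),
--             "work_hours": job.get("work_hours", ""),
--         })
--         if len(samples) >= n:
--             break
--     return samples
-- ===== SOURCE B (Python) =====
-- def get_sample_jobs(jobs_with_salary, n=3):
--     """Aggregate the best job per employer in one pass, then rank employers."""
--     best = {}  # employer -> (salary_high, original_index, salary_low, employment_type, work_hours)
--     for i, (job, (sal_low, sal_high)) in enumerate(jobs_with_salary):
--         employer = job.get("employer", "").strip()
--         cur = best.get(employer)
--         if cur is None or cur[0] < sal_high: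
--             best[employer] = (sal_high, i, sal_low,
--                               job.get("employment_type", ""),
--                               job.get("work_hours", ""))
--     ranked = sorted(best.items(), key=lambda kv: (-kv[1][0], kv[1][1]))
--     samples = []
--     for employer, (sal_high, i, sal_low, emp_type, hours) in ranked:
--         samples.append({
--             "employer": employer,
--             "salary_range": f"{sal_low:,}円～{sal_high:,}円",
--             "employment_type": emp_type,
--             "work_hours": hours,
--         })
--         if len(samples) >= n:
--             break
--     return samples
-- ===== Notes on version B (the rewrite author's own statement) =====
-- stated objective: alternative
-- what changed: A sorts the whole job list by salary_high (stable, descending) and then scans it once, skipping employers already seen and breaking at n; B never sorts the jobs: it aggregates, in one pass over enumerate(jobs_with_salary), a dict mapping each employer to its best job (strictly higher salary_high wins, so ties keep the earliest index), then sorts only the per-employer bests by (-salary_high, original index) and emits them with the same append-then-break loop.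
import Mathlib
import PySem

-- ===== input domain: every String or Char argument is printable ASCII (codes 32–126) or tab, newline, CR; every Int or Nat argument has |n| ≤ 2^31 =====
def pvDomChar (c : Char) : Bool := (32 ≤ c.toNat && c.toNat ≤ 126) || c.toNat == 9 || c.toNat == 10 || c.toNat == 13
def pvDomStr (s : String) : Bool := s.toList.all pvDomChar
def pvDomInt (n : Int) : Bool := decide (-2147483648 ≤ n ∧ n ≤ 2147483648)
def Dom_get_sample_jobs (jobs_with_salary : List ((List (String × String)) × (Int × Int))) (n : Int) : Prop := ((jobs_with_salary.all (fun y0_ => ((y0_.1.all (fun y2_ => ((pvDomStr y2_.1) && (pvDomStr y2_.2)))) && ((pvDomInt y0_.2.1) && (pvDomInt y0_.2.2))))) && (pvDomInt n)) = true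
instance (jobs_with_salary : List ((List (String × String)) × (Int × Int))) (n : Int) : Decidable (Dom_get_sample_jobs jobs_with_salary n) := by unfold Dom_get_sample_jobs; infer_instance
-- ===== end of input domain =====

-- B replaces A's sort-all-jobs-then-dedup-scan by a one-pass best-per-employer dict aggregation
-- followed by a sort of the per-employer bests only (objective: alternative algorithm, same results).

-- shared formatting helper: hand-written port of Python's f"{x:,}" (decimal digits grouped in
-- threes from the right, '-' kept outside the grouping) — exact for every Int
def pvCommaRev : List Char → List Char
  | c1 :: c2 :: c3 :: c4 :: rest => c1 :: c2 :: c3 :: ',' :: pvCommaRev (c4 :: rest)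
  | l => l
termination_by l => l.length
decreasing_by simp

def pvCommaFmt (x : Int) : String :=
  if x < 0 then String.mk ('-' :: (pvCommaRev (PySem.Int.toChars (-x)).reverse).reverse)
  else String.mk (pvCommaRev (PySem.Int.toChars x).reverse).reverse

-- the sample dict literal both Pythons build (identical f-string and keys in both)
def pvSample (employer : String) (sal_low sal_high : Int) (emp_type hours : String) :
    List (String × String) :=
  [("employer", employer),
   ("salary_range", pvCommaFmt sal_low ++ "円～" ++ pvCommaFmt sal_high ++ "円"),
   ("employment_type", emp_type),
   ("work_hours", hours)]

-- job.get("employer", "").strip()  (identical expression in both Pythons)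
def pvEmployer (job : List (String × String)) : String :=
  PySem.Str.strip (PySem.Dict.getD (PySem.Dict.mk job) "employer" "")

-- ===== PORT A =====
-- the for-loop over sorted_jobs with seen_employers and the append-then-break
def pvGoA : List ((List (String × String)) × (Int × Int)) → Int → PySem.Set String →
    List (List (String × String)) → List (List (String × String))
  | [], _, _, samples => samples
  | (job, (sal_low, sal_high)) :: rest, n, seen, samples =>
    let employer := pvEmployer job
    if PySem.Set.contains seen employer then pvGoA rest n seen samples
    else
      let seen' := PySem.Set.add seen employer
      let samples' := samples ++ [pvSample employer sal_low sal_high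
          (PySem.Dict.getD (PySem.Dict.mk job) "employment_type" "")
          (PySem.Dict.getD (PySem.Dict.mk job) "work_hours" "")]
      if n ≤ PySem.List.len samples' then samples'
      else pvGoA rest n seen' samples'

def get_sample_jobs (jobs_with_salary : List ((List (String × String)) × (Int × Int))) (n : Int) :
    List (List (String × String)) :=
  let sorted_jobs := PySem.List.sorted jobs_with_salary (fun x => x.2.2) true
  pvGoA sorted_jobs n PySem.Set.empty []

-- ===== PORT B =====
-- one pass over enumerate(jobs_with_salary):
-- best[employer] = (salary_high, i, salary_low, employment_type, work_hours), strictly higher wins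
def pvBuildBest : List (Int × ((List (String × String)) × (Int × Int))) →
    PySem.Dict String (Int × Int × Int × String × String) →
    PySem.Dict String (Int × Int × Int × String × String)
  | [], best => best
  | (i, (job, (sal_low, sal_high))) :: rest, best =>
    let employer := pvEmployer job
    let best' :=
      match PySem.Dict.get? best employer with
      | none => best.insert employer (sal_high, i, sal_low,
          PySem.Dict.getD (PySem.Dict.mk job) "employment_type" "",
          PySem.Dict.getD (PySem.Dict.mk job) "work_hours" "")
      | some cur =>
        if cur.1 < sal_high then
          best.insert employer (sal_high, i, sal_low,
            PySem.Dict.getD (PySem.Dict.mk job) "employment_type" "",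
            PySem.Dict.getD (PySem.Dict.mk job) "work_hours" "")
        else best
    pvBuildBest rest best'

-- the emission loop over the ranked per-employer bests (same append-then-break as the Python)
def pvEmitB : List (String × (Int × Int × Int × String × String)) → Int →
    List (List (String × String)) → List (List (String × String))
  | [], _, samples => samples
  | (employer, (sal_high, _, sal_low, emp_type, hours)) :: rest, n, samples =>
    let samples' := samples ++ [pvSample employer sal_low sal_high emp_type hours]
    if n ≤ PySem.List.len samples' then samples'
    else pvEmitB rest n samples'

def get_sample_jobs_alt (jobs_with_salary : List ((List (String × String)) × (Int × Int))) (n : Int) :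
    List (List (String × String)) :=
  let best := pvBuildBest (PySem.List.enumerate jobs_with_salary) PySem.Dict.empty
  let ranked := PySem.List.sorted2 best.items (fun kv => -kv.2.1) (fun kv => kv.2.2.1) false
  pvEmitB ranked n []

-- ===== PRECONDITION & SPEC =====
def Spec_get_sample_jobs (jobs_with_salary : List ((List (String × String)) × (Int × Int))) (n : Int) (out : List (List (String × String))) : Prop := out = get_sample_jobs_alt jobs_with_salary n
instance (jobs_with_salary : List ((List (String × String)) × (Int × Int))) (n : Int) (out : List (List (String × String))) : Decidable (Spec_get_sample_jobs jobs_with_salary n out) := by unfold Spec_get_sample_jobs; infer_instance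

-- ===== CLAIM (what is proved, stated in full; the proofs are below) =====
def Claim_equal_get_sample_jobs : Prop := ∀ (jobs_with_salary : List ((List (String × String)) × (Int × Int))) (n : Int), Dom_get_sample_jobs jobs_with_salary n → Spec_get_sample_jobs jobs_with_salary n (get_sample_jobs jobs_with_salary n)

-- ===== LEMMAS AND PROOFS =====

-- abbreviations used ONLY by the proofs
abbrev PvJob := (List (String × String)) × (Int × Int)
abbrev PvP := Int × PvJob
abbrev PvVal := Int × Int × Int × String × String

def pvEmp (p : PvP) : String := pvEmployer p.2.1
def pvVal (p : PvP) : PvVal :=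
  (p.2.2.2, p.1, p.2.2.1,
   PySem.Dict.getD (PySem.Dict.mk p.2.1) "employment_type" "",
   PySem.Dict.getD (PySem.Dict.mk p.2.1) "work_hours" "")
def pvG (p : PvP) : String × PvVal := (pvEmp p, pvVal p)

-- the boolean "strictly before" order used by sorted2 (lex on (k1, k2))
def pvLex {α : Type} (k1 k2 : α → Int) : α → α → Bool :=
  fun a b => decide (k1 a < k1 b) || (!decide (k1 b < k1 a) && decide (k2 a < k2 b))

def pvK1 (p : PvP) : Int := -(p.2.2.2)
def pvK2 (p : PvP) : Int := p.1

theorem pvLex_iff {α : Type} (k1 k2 : α → Int) (a b : α) :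
    pvLex k1 k2 a b = true ↔ (k1 a < k1 b ∨ (k1 a = k1 b ∧ k2 a < k2 b)) := by
  simp [pvLex]; omega

theorem pvLexP_iff (p q : PvP) :
    pvLex pvK1 pvK2 p q = true ↔ (q.2.2.2 < p.2.2.2 ∨ (p.2.2.2 = q.2.2.2 ∧ p.1 < q.1)) := by
  rw [pvLex_iff]; unfold pvK1 pvK2; omega

theorem pvLex_trans {α : Type} (k1 k2 : α → Int) {a b c : α}
    (h1 : pvLex k1 k2 a b = true) (h2 : pvLex k1 k2 b c = true) : pvLex k1 k2 a c = true := by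
  rw [pvLex_iff] at *; omega

theorem pvLex_asymm {α : Type} (k1 k2 : α → Int) {a b : α}
    (h1 : pvLex k1 k2 a b = true) (h2 : pvLex k1 k2 b a = true) : False := by
  rw [pvLex_iff] at *; omega

theorem pvLex_eq_false_iff {α : Type} (k1 k2 : α → Int) (a b : α) :
    pvLex k1 k2 a b = false ↔ ¬ pvLex k1 k2 a b = true := by
  cases h : pvLex k1 k2 a b <;> simp

-- sorted2 (reverse=False) is the insertion-sort fold with pvLex
theorem pv_sorted2_foldl {α : Type} (xs : List α) (k1 k2 : α → Int) :
    PySem.List.sorted2 xs k1 k2 false =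
      xs.foldl (fun acc x => PySem.List.insertBy (pvLex k1 k2) x acc) [] := rfl

-- insertion preserves non-strict sortedness
theorem pv_insertBy_pairwise {α : Type} (k1 k2 : α → Int) (x : α) (acc : List α)
    (h : acc.Pairwise (fun a b => pvLex k1 k2 b a = false)) :
    (PySem.List.insertBy (pvLex k1 k2) x acc).Pairwise (fun a b => pvLex k1 k2 b a = false) := by
  induction acc with
  | nil => simp [PySem.List.insertBy]
  | cons y ys ih =>
    rw [List.pairwise_cons] at h
    obtain ⟨hy, hys⟩ := h
    by_cases hxy : pvLex k1 k2 x y = true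
    · rw [PySem.List.insertBy, if_pos hxy]
      refine List.pairwise_cons.mpr ⟨?_, List.pairwise_cons.mpr ⟨hy, hys⟩⟩
      intro z hz
      rw [pvLex_eq_false_iff]
      rcases List.mem_cons.mp hz with rfl | hz'
      · intro hyx; exact pvLex_asymm k1 k2 hxy hyx
      · intro hzx
        have hzy : pvLex k1 k2 z y = true := pvLex_trans k1 k2 hzx hxy
        have := hy z hz'
        rw [pvLex_eq_false_iff] at this; exact this hzy
    · rw [PySem.List.insertBy, if_neg hxy]
      refine List.pairwise_cons.mpr ⟨?_, ih hys⟩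
      intro z hz
      rcases (PySem.List.mem_insertBy _ _ _ _).mp hz with rfl | hz'
      · rw [pvLex_eq_false_iff]; exact hxy
      · exact hy z hz'

theorem pv_foldl_insertBy_pairwise {α : Type} (k1 k2 : α → Int) :
    ∀ (l acc : List α), acc.Pairwise (fun a b => pvLex k1 k2 b a = false) →
    (l.foldl (fun acc x => PySem.List.insertBy (pvLex k1 k2) x acc) acc).Pairwise
      (fun a b => pvLex k1 k2 b a = false)
  | [], acc, h => h
  | x :: t, acc, h => by
    rw [List.foldl_cons]
    exact pv_foldl_insertBy_pairwise k1 k2 t _ (pv_insertBy_pairwise k1 k2 x acc h)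

-- uniqueness: a strictly pvLex-sorted permutation is THE insertion-sort result
theorem pv_unique {α : Type} (k1 k2 : α → Int) :
    ∀ (ys zs : List α), ys.Perm zs →
      ys.Pairwise (fun a b => pvLex k1 k2 a b = true) →
      zs.Pairwise (fun a b => pvLex k1 k2 b a = false) → zs = ys
  | [], zs, hp, _, _ => (List.Perm.nil_eq hp).symm
  | a :: ys', zs, hp, hys, hzs => by
    cases zs with
    | nil => exact absurd hp.symm (by simp)
    | cons b zs' =>
      rw [List.pairwise_cons] at hys hzs
      by_cases hab : b = a
      · subst hab
        have : ys'.Perm zs' := hp.cons_inv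
        rw [pv_unique k1 k2 ys' zs' this hys.2 hzs.2]
      · exfalso
        have hb' : b ∈ ys' := by
          rcases List.mem_cons.mp (hp.symm.subset (List.mem_cons_self ..)) with h | h
          · exact absurd h hab
          · exact h
        have h1 : pvLex k1 k2 a b = true := hys.1 b hb'
        have ha' : a ∈ zs' := by
          rcases List.mem_cons.mp (hp.subset (List.mem_cons_self ..)) with h | h
          · exact absurd h.symm hab
          · exact h
        have h2 := hzs.1 a ha'
        rw [pvLex_eq_false_iff] at h2; exact h2 h1

theorem pv_sorted2_eq {α : Type} (k1 k2 : α → Int) (xs ys : List α)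
    (hperm : ys.Perm xs) (hpw : ys.Pairwise (fun a b => pvLex k1 k2 a b = true)) :
    PySem.List.sorted2 xs k1 k2 false = ys := by
  have hzp : (PySem.List.sorted2 xs k1 k2 false).Perm xs :=
    PySem.List.sorted2_perm xs k1 k2 false
  have hpair : (PySem.List.sorted2 xs k1 k2 false).Pairwise
      (fun a b => pvLex k1 k2 b a = false) := by
    rw [pv_sorted2_foldl]
    exact pv_foldl_insertBy_pairwise k1 k2 xs [] (by simp)
  exact pv_unique k1 k2 ys _ (hperm.trans hzp.symm) hpw hpair

-- ===== stable reverse sort = lexicographic sort of the enumerated list =====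

def pvBA : PvJob → PvJob → Bool := fun a b => decide (b.2.2 < a.2.2)

theorem pv_sorted_foldl (xs : List PvJob) :
    PySem.List.sorted xs (fun x => x.2.2) true =
      xs.foldl (fun acc x => PySem.List.insertBy pvBA x acc) [] := rfl

theorem pv_insertBy_enum (x : PvJob) (i : Int) (acc : List PvP)
    (h : ∀ q ∈ acc, q.1 < i) :
    (PySem.List.insertBy (pvLex pvK1 pvK2) (i, x) acc).map (·.2) =
      PySem.List.insertBy pvBA x (acc.map (·.2)) ∧
    (∀ q ∈ PySem.List.insertBy (pvLex pvK1 pvK2) (i, x) acc, q.1 ≤ i) := by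
  induction acc with
  | nil =>
    constructor
    · simp [PySem.List.insertBy]
    · intro q hq
      rcases (PySem.List.mem_insertBy _ _ _ _).mp hq with rfl | hq'
      · simp
      · cases hq'
  | cons y ys ih =>
    have hy : y.1 < i := h y (by simp)
    have hlex : pvLex pvK1 pvK2 (i, x) y = pvBA x y.2 := by
      by_cases h2 : y.2.2.2 < x.2.2
      · rw [show pvBA x y.2 = true from decide_eq_true h2]
        exact (pvLex_iff _ _ _ _).mpr (Or.inl (by show -(x.2.2) < -(y.2.2.2); omega))
      · rw [show pvBA x y.2 = false from decide_eq_false h2]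
        rw [pvLex_eq_false_iff, pvLex_iff]
        show ¬ (-(x.2.2) < -(y.2.2.2) ∨ (-(x.2.2) = -(y.2.2.2) ∧ i < y.1))
        omega
    obtain ⟨ih1, ih2⟩ := ih (fun q hq => h q (by simp [hq]))
    by_cases hc : pvBA x y.2 = true
    · rw [PySem.List.insertBy, hlex, if_pos hc]
      constructor
      · simp only [List.map_cons]
        rw [PySem.List.insertBy, if_pos hc]
      · intro q hq
        rcases List.mem_cons.mp hq with rfl | hq'
        · simp
        · rcases List.mem_cons.mp hq' with rfl | hq''
          · omega
          · exact le_of_lt (h q (by simp [hq'']))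
    · rw [PySem.List.insertBy, hlex, if_neg hc]
      constructor
      · simp only [List.map_cons]
        rw [PySem.List.insertBy, if_neg hc, ← ih1]
      · intro q hq
        rcases List.mem_cons.mp hq with rfl | hq'
        · exact le_of_lt hy
        · exact ih2 q hq'

theorem pv_enum_aux :
    ∀ (xs : List PvJob) (s : Int) (acc : List PvP), (∀ q ∈ acc, q.1 < s) →
      ((PySem.List.enumerate xs s).foldl
          (fun acc p => PySem.List.insertBy (pvLex pvK1 pvK2) p acc) acc).map (·.2) =
        xs.foldl (fun acc x => PySem.List.insertBy pvBA x acc) (acc.map (·.2))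
  | [], s, acc, h => by simp [PySem.List.enumerate]
  | x :: t, s, acc, h => by
    rw [show PySem.List.enumerate (x :: t) s = (s, x) :: PySem.List.enumerate t (s + 1) from rfl]
    rw [List.foldl_cons, List.foldl_cons]
    obtain ⟨h1, h2⟩ := pv_insertBy_enum x s acc h
    rw [← h1]
    exact pv_enum_aux t (s + 1) _ (fun q hq => by have := h2 q hq; omega)

-- ===== enumerate facts =====

theorem pv_enum_index_le : ∀ (xs : List PvJob) (s : Int), ∀ q ∈ PySem.List.enumerate xs s, s ≤ q.1
  | [], s => by simp [PySem.List.enumerate]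
  | x :: t, s => by
    intro q hq
    rw [show PySem.List.enumerate (x :: t) s = (s, x) :: PySem.List.enumerate t (s + 1) from rfl] at hq
    rcases List.mem_cons.mp hq with rfl | hq'
    · simp
    · have := pv_enum_index_le t (s + 1) q hq'; omega

theorem pv_enum_pairwise : ∀ (xs : List PvJob) (s : Int),
    (PySem.List.enumerate xs s).Pairwise (fun a b => a.1 < b.1)
  | [], s => by simp [PySem.List.enumerate]
  | x :: t, s => by
    rw [show PySem.List.enumerate (x :: t) s = (s, x) :: PySem.List.enumerate t (s + 1) from rfl]
    refine List.pairwise_cons.mpr ⟨?_, pv_enum_pairwise t (s + 1)⟩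
    intro q hq
    have := pv_enum_index_le t (s + 1) q hq; omega

-- ===== the ghost list T (jobs in A's sorted order, with their original indices) =====

def pvT (xs : List PvJob) : List PvP :=
  PySem.List.sorted2 (PySem.List.enumerate xs) pvK1 pvK2 false

theorem pvT_perm (xs : List PvJob) : (pvT xs).Perm (PySem.List.enumerate xs) :=
  PySem.List.sorted2_perm _ _ _ _

theorem pv_stable_sort_T (xs : List PvJob) :
    PySem.List.sorted xs (fun x => x.2.2) true = (pvT xs).map (·.2) := by
  rw [pv_sorted_foldl]
  unfold pvT
  rw [pv_sorted2_foldl]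
  exact (pv_enum_aux xs 0 [] (by simp)).symm

theorem pvT_pairwise (xs : List PvJob) :
    (pvT xs).Pairwise (fun a b => pvLex pvK1 pvK2 a b = true) := by
  have hns : (pvT xs).Pairwise (fun a b => pvLex pvK1 pvK2 b a = false) := by
    unfold pvT; rw [pv_sorted2_foldl]
    exact pv_foldl_insertBy_pairwise _ _ _ [] (by simp)
  have hidx : (pvT xs).Pairwise (fun a b => a.1 ≠ b.1) := by
    have h1 : ((PySem.List.enumerate (α := PvJob) xs).map (·.1)).Nodup := by
      have h0 : (PySem.List.enumerate (α := PvJob) xs).Pairwise (fun a b => a.1 ≠ b.1) :=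
        (pv_enum_pairwise xs 0).imp (fun h => ne_of_lt h)
      exact List.pairwise_map.mpr h0
    have h2 : ((pvT xs).map (·.1)).Nodup :=
      (((pvT_perm xs).map (·.1)).nodup_iff).mpr h1
    exact List.pairwise_map.mp h2
  refine (hns.and hidx).imp ?_
  rintro a b ⟨h1, h2⟩
  rw [pvLex_eq_false_iff, pvLexP_iff] at h1
  rw [pvLexP_iff]
  omega

-- ===== the sieve: first occurrence per employer, in T order =====

def pvSieve : List PvP → PySem.Set String → List PvP
  | [], _ => []
  | p :: rest, seen =>
    if PySem.Set.contains seen (pvEmp p) then pvSieve rest seen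
    else p :: pvSieve rest (PySem.Set.add seen (pvEmp p))

theorem pv_contains_iff (s : PySem.Set String) (e : String) :
    PySem.Set.contains s e = true ↔ e ∈ s := by
  simp [PySem.Set.contains]

theorem pv_contains_false_iff (s : PySem.Set String) (e : String) :
    PySem.Set.contains s e = false ↔ e ∉ s := by
  rw [← pv_contains_iff]
  cases PySem.Set.contains s e <;> simp

theorem pv_contains_add_false_iff (s : PySem.Set String) (x y : String) :
    PySem.Set.contains (PySem.Set.add s x) y = false ↔
      (PySem.Set.contains s y = false ∧ y ≠ x) := by
  rw [pv_contains_false_iff, pv_contains_false_iff, PySem.Set.mem_add]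
  tauto

theorem pv_sieve_sublist : ∀ (l : List PvP) (seen : PySem.Set String),
    (pvSieve l seen).Sublist l
  | [], _ => by simp [pvSieve]
  | p :: t, seen => by
    rw [pvSieve]
    split
    · exact (pv_sieve_sublist t seen).cons p
    · exact (pv_sieve_sublist t _).cons₂ p

theorem pv_sieve_mem : ∀ (l : List PvP) (seen : PySem.Set String),
    l.Pairwise (fun a b => pvLex pvK1 pvK2 a b = true) →
    ∀ p : PvP, (p ∈ pvSieve l seen ↔ (p ∈ l ∧ PySem.Set.contains seen (pvEmp p) = false ∧
        ∀ q ∈ l, pvEmp q = pvEmp p → q = p ∨ pvLex pvK1 pvK2 p q = true))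
  | [], seen, _, p => by simp [pvSieve]
  | x :: t, seen, h, p => by
    rw [List.pairwise_cons] at h
    obtain ⟨hx, ht⟩ := h
    rw [pvSieve]
    by_cases hc : PySem.Set.contains seen (pvEmp x) = true
    · rw [if_pos hc, pv_sieve_mem t seen ht p]
      constructor
      · rintro ⟨hpt, hseen, hmin⟩
        refine ⟨List.mem_cons_of_mem x hpt, hseen, ?_⟩
        intro q hq hqe
        rcases List.mem_cons.mp hq with rfl | hq'
        · exfalso; rw [hqe] at hc; rw [hc] at hseen; cases hseen
        · exact hmin q hq' hqe
      · rintro ⟨hpl, hseen, hmin⟩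
        have hpx : p ≠ x := by
          rintro rfl; rw [hc] at hseen; cases hseen
        rcases List.mem_cons.mp hpl with rfl | hpt
        · exact absurd rfl hpx
        · exact ⟨hpt, hseen, fun q hq hqe => hmin q (List.mem_cons_of_mem x hq) hqe⟩
    · have hcf : PySem.Set.contains seen (pvEmp x) = false := by
        cases hcc : PySem.Set.contains seen (pvEmp x)
        · rfl
        · exact absurd hcc hc
      rw [if_neg hc]
      constructor
      · intro hp
        rcases List.mem_cons.mp hp with rfl | hp'
        · refine ⟨List.mem_cons_self .., hcf, ?_⟩
          intro q hq hqe
          rcases List.mem_cons.mp hq with rfl | hq'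
          · exact Or.inl rfl
          · exact Or.inr (hx q hq')
        · obtain ⟨hpt, hadd, hmin⟩ := (pv_sieve_mem t _ ht p).mp hp'
          obtain ⟨hseen, hne⟩ := (pv_contains_add_false_iff _ _ _).mp hadd
          refine ⟨List.mem_cons_of_mem x hpt, hseen, ?_⟩
          intro q hq hqe
          rcases List.mem_cons.mp hq with rfl | hq'
          · exact absurd hqe.symm hne
          · exact hmin q hq' hqe
      · rintro ⟨hpl, hseen, hmin⟩
        by_cases hpx : p = x
        · subst hpx; exact List.mem_cons_self ..
        · have hpt : p ∈ t := by
            rcases List.mem_cons.mp hpl with rfl | hpt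
            · exact absurd rfl hpx
            · exact hpt
          have hne : pvEmp p ≠ pvEmp x := by
            intro he
            rcases hmin x (List.mem_cons_self ..) he.symm with rfl | hlex
            · exact hpx rfl
            · exact pvLex_asymm pvK1 pvK2 (hx p hpt) hlex
          refine List.mem_cons_of_mem x ((pv_sieve_mem t _ ht p).mpr ⟨hpt, ?_, ?_⟩)
          · exact (pv_contains_add_false_iff _ _ _).mpr ⟨hseen, hne⟩
          · exact fun q hq hqe => hmin q (List.mem_cons_of_mem x hq) hqe

theorem pv_sieve_emp_nodup : ∀ (l : List PvP) (seen : PySem.Set String),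
    ((pvSieve l seen).map pvEmp).Nodup ∧
      ∀ e ∈ (pvSieve l seen).map pvEmp, PySem.Set.contains seen e = false
  | [], seen => by simp [pvSieve]
  | x :: t, seen => by
    rw [pvSieve]
    split
    · exact pv_sieve_emp_nodup t seen
    · rename_i hc
      have hcf : PySem.Set.contains seen (pvEmp x) = false := by
        cases hcc : PySem.Set.contains seen (pvEmp x)
        · rfl
        · exact absurd hcc hc
      obtain ⟨ih1, ih2⟩ := pv_sieve_emp_nodup t (PySem.Set.add seen (pvEmp x))
      rw [List.map_cons]
      constructor
      · refine List.nodup_cons.mpr ⟨?_, ih1⟩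
        intro hmem
        have := (pv_contains_add_false_iff _ _ _).mp (ih2 _ hmem)
        exact this.2 rfl
      · intro e he
        rcases List.mem_cons.mp he with rfl | he'
        · exact hcf
        · exact ((pv_contains_add_false_iff _ _ _).mp (ih2 e he')).1

-- ===== the two emission loops agree on the deduplicated list =====

def pvEmitP : List PvP → Int → List (List (String × String)) → List (List (String × String))
  | [], _, samples => samples
  | p :: rest, n, samples =>
    let samples' := samples ++ [pvSample (pvEmp p) p.2.2.1 p.2.2.2
        (PySem.Dict.getD (PySem.Dict.mk p.2.1) "employment_type" "")
        (PySem.Dict.getD (PySem.Dict.mk p.2.1) "work_hours" "")]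
    if n ≤ PySem.List.len samples' then samples'
    else pvEmitP rest n samples'

theorem pv_goA_eq : ∀ (l : List PvP) (n : Int) (seen : PySem.Set String)
    (samples : List (List (String × String))),
    pvGoA (l.map (·.2)) n seen samples = pvEmitP (pvSieve l seen) n samples
  | [], n, seen, samples => by simp [pvGoA, pvSieve, pvEmitP]
  | p :: t, n, seen, samples => by
    obtain ⟨i, job, lo, hi⟩ := p
    rw [List.map_cons]
    show pvGoA ((job, (lo, hi)) :: t.map (·.2)) n seen samples = _
    have hs : pvSieve ((i, (job, (lo, hi))) :: t) seen =
        if PySem.Set.contains seen (pvEmployer job) then pvSieve t seen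
        else (i, (job, (lo, hi))) :: pvSieve t (PySem.Set.add seen (pvEmployer job)) := rfl
    rw [pvGoA, hs]
    by_cases hc : PySem.Set.contains seen (pvEmployer job) = true
    · rw [if_pos hc, if_pos hc]
      exact pv_goA_eq t n seen samples
    · rw [if_neg hc, if_neg hc]
      have he : pvEmitP ((i, (job, (lo, hi))) :: pvSieve t (PySem.Set.add seen (pvEmployer job)))
          n samples =
        (if n ≤ PySem.List.len (samples ++ [pvSample (pvEmployer job) lo hi
            (PySem.Dict.getD (PySem.Dict.mk job) "employment_type" "")
            (PySem.Dict.getD (PySem.Dict.mk job) "work_hours" "")]) then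
          samples ++ [pvSample (pvEmployer job) lo hi
            (PySem.Dict.getD (PySem.Dict.mk job) "employment_type" "")
            (PySem.Dict.getD (PySem.Dict.mk job) "work_hours" "")]
        else pvEmitP (pvSieve t (PySem.Set.add seen (pvEmployer job))) n
          (samples ++ [pvSample (pvEmployer job) lo hi
            (PySem.Dict.getD (PySem.Dict.mk job) "employment_type" "")
            (PySem.Dict.getD (PySem.Dict.mk job) "work_hours" "")])) := rfl
      rw [he]
      dsimp only
      split
      · rfl
      · exact pv_goA_eq t n _ _

theorem pv_emitB_eq : ∀ (l : List PvP) (n : Int) (samples : List (List (String × String))),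
    pvEmitB (l.map pvG) n samples = pvEmitP l n samples
  | [], n, samples => by simp [pvEmitB, pvEmitP]
  | p :: t, n, samples => by
    rw [List.map_cons]
    show pvEmitB ((pvEmp p, pvVal p) :: t.map pvG) n samples = _
    have hB : pvEmitB ((pvEmp p, pvVal p) :: t.map pvG) n samples =
        (if n ≤ PySem.List.len (samples ++ [pvSample (pvEmp p) p.2.2.1 p.2.2.2
            (PySem.Dict.getD (PySem.Dict.mk p.2.1) "employment_type" "")
            (PySem.Dict.getD (PySem.Dict.mk p.2.1) "work_hours" "")]) then
          samples ++ [pvSample (pvEmp p) p.2.2.1 p.2.2.2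
            (PySem.Dict.getD (PySem.Dict.mk p.2.1) "employment_type" "")
            (PySem.Dict.getD (PySem.Dict.mk p.2.1) "work_hours" "")]
        else pvEmitB (t.map pvG) n (samples ++ [pvSample (pvEmp p) p.2.2.1 p.2.2.2
            (PySem.Dict.getD (PySem.Dict.mk p.2.1) "employment_type" "")
            (PySem.Dict.getD (PySem.Dict.mk p.2.1) "work_hours" "")])) := rfl
    rw [hB, pvEmitP]
    split
    · rfl
    · exact pv_emitB_eq t n _

-- ===== characterising the dict built by B =====

def pvUpd : Option PvVal → PvP → Option PvVal
  | none, p => some (pvVal p)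
  | some cur, p => if cur.1 < p.2.2.2 then some (pvVal p) else some cur

theorem pv_buildBest_get? : ∀ (l : List PvP) (d : PySem.Dict String PvVal) (e : String),
    (pvBuildBest l d).get? e = (l.filter (fun p => pvEmp p == e)).foldl pvUpd (d.get? e)
  | [], d, e => by simp [pvBuildBest]
  | p :: t, d, e => by
    obtain ⟨i, job, lo, hi⟩ := p
    rw [pvBuildBest]
    have hval : (hi, i, lo,
        PySem.Dict.getD (PySem.Dict.mk job) "employment_type" "",
        PySem.Dict.getD (PySem.Dict.mk job) "work_hours" "") = pvVal (i, (job, (lo, hi))) := rfl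
    by_cases he : pvEmp (i, (job, (lo, hi))) = e
    · have hemh : pvEmployer job = e := he
      rw [List.filter_cons_of_pos (by simp [he])]
      rw [List.foldl_cons]
      cases hget : PySem.Dict.get? d (pvEmployer job) with
      | none =>
        simp only [hemh, hval]
        rw [pv_buildBest_get? t _ e, PySem.Dict.get?_insert_self]
        rw [hemh] at hget
        rw [hget]
        rfl
      | some cur =>
        simp only [hemh, hval]
        rw [hemh] at hget
        by_cases hlt : cur.1 < hi
        · rw [if_pos hlt]
          rw [pv_buildBest_get? t _ e, PySem.Dict.get?_insert_self, hget]
          show _ = (List.filter _ t).foldl pvUpd (pvUpd (some cur) (i, (job, (lo, hi))))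
          rw [show pvUpd (some cur) (i, (job, (lo, hi))) = some (pvVal (i, (job, (lo, hi)))) by
            simp [pvUpd, hlt]]
        · rw [if_neg hlt]
          rw [pv_buildBest_get? t _ e, hget]
          show _ = (List.filter _ t).foldl pvUpd (pvUpd (some cur) (i, (job, (lo, hi))))
          rw [show pvUpd (some cur) (i, (job, (lo, hi))) = some cur by simp [pvUpd, hlt]]
    · rw [List.filter_cons_of_neg (by simp [he])]
      have hne : e ≠ pvEmployer job := fun h => he h.symm
      cases hget : PySem.Dict.get? d (pvEmployer job) with
      | none =>
        rw [pv_buildBest_get? t _ e, PySem.Dict.get?_insert_of_ne _ _ hne]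
      | some cur =>
        dsimp only
        by_cases hlt : cur.1 < hi
        · rw [if_pos hlt, pv_buildBest_get? t _ e, PySem.Dict.get?_insert_of_ne _ _ hne]
        · rw [if_neg hlt, pv_buildBest_get? t _ e]

theorem pv_buildBest_keys_nodup : ∀ (l : List PvP) (d : PySem.Dict String PvVal),
    d.keys.Nodup → (pvBuildBest l d).keys.Nodup
  | [], d, h => h
  | p :: t, d, h => by
    obtain ⟨i, job, lo, hi⟩ := p
    rw [pvBuildBest]
    cases hget : PySem.Dict.get? d (pvEmployer job) with
    | none =>
      exact pv_buildBest_keys_nodup t _ (PySem.Dict.nodup_keys_insert _ _ _ h)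
    | some cur =>
      dsimp only
      split
      · exact pv_buildBest_keys_nodup t _ (PySem.Dict.nodup_keys_insert _ _ _ h)
      · exact pv_buildBest_keys_nodup t _ h

-- ===== the left fold with pvUpd selects the lexicographically least element =====

def pvSel : PvP → List PvP → PvP
  | c, [] => c
  | c, q :: r => pvSel (if c.2.2.2 < q.2.2.2 then q else c) r

theorem pv_foldl_upd_some : ∀ (r : List PvP) (c : PvP),
    r.foldl pvUpd (some (pvVal c)) = some (pvVal (pvSel c r))
  | [], c => rfl
  | q :: r, c => by
    rw [List.foldl_cons, pvSel]
    have : pvUpd (some (pvVal c)) q = some (pvVal (if c.2.2.2 < q.2.2.2 then q else c)) := by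
      by_cases hlt : c.2.2.2 < q.2.2.2
      · simp [pvUpd, pvVal, hlt]
      · simp [pvUpd, pvVal, hlt]
    rw [this]
    exact pv_foldl_upd_some r _

theorem pv_sel_mem : ∀ (r : List PvP) (c : PvP), pvSel c r ∈ c :: r
  | [], c => by simp [pvSel]
  | q :: r, c => by
    rw [pvSel]
    have := pv_sel_mem r (if c.2.2.2 < q.2.2.2 then q else c)
    rcases List.mem_cons.mp this with h | h
    · rw [h]; split <;> simp
    · simp [h]

theorem pv_sel_min : ∀ (r : List PvP) (c : PvP),
    (c :: r).Pairwise (fun a b => a.1 < b.1) →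
    ∀ q ∈ c :: r, q ≠ pvSel c r → pvLex pvK1 pvK2 (pvSel c r) q = true
  | [], c, _, q, hq, hne => by
    rcases List.mem_cons.mp hq with rfl | h
    · simp [pvSel] at hne
    · simp at h
  | qh :: r', c, h, q, hq, hne => by
    rw [List.pairwise_cons] at h
    obtain ⟨hcall, hrest⟩ := h
    rw [List.pairwise_cons] at hrest
    obtain ⟨hqhall, hr'⟩ := hrest
    have hcq : c.1 < qh.1 := hcall qh (List.mem_cons_self ..)
    set c' := if c.2.2.2 < qh.2.2.2 then qh else c with hc'def
    have hc'pw : (c' :: r').Pairwise (fun a b : PvP => a.1 < b.1) := by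
      refine List.pairwise_cons.mpr ⟨?_, hr'⟩
      intro z hz
      rw [hc'def]; split
      · exact hqhall z hz
      · exact hcall z (List.mem_cons_of_mem qh hz)
    have hsel : pvSel c (qh :: r') = pvSel c' r' := by rw [pvSel]
    set m := pvSel c' r' with hmdef
    have key : ∀ z ∈ c' :: r', z ≠ m → pvLex pvK1 pvK2 m z = true :=
      fun z hz hzm => pv_sel_min r' c' hc'pw z hz hzm
    -- the element of {c, qh} that was not chosen
    have hdrop : ∀ d : PvP, (c' = qh ∧ d = c) ∨ (c' = c ∧ d = qh) →
        pvLex pvK1 pvK2 m d = true := by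
      rintro d hd
      have hlexd : pvLex pvK1 pvK2 c' d = true := by
        rcases hd with ⟨h1, hdc⟩ | ⟨h1, hdq⟩
        · rw [hdc, h1, pvLexP_iff]
          by_cases hx : c.2.2.2 < qh.2.2.2
          · exact Or.inl hx
          · exfalso
            rw [hc'def, if_neg hx] at h1
            have : c.1 = qh.1 := by rw [h1]
            omega
        · rw [hdq, h1, pvLexP_iff]
          by_cases hx : c.2.2.2 < qh.2.2.2
          · exfalso
            rw [hc'def, if_pos hx] at h1
            have : qh.1 = c.1 := by rw [h1]
            omega
          · omega
      by_cases hmc : m = c'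
      · rw [hmc]; exact hlexd
      · exact pvLex_trans pvK1 pvK2 (key c' (List.mem_cons_self ..) (fun h => hmc h.symm)) hlexd
    rw [hsel] at hne ⊢
    rcases List.mem_cons.mp hq with hqc | hq'
    · by_cases hx : c.2.2.2 < qh.2.2.2
      · exact hdrop q (Or.inl ⟨by rw [hc'def, if_pos hx], hqc⟩)
      · refine key q ?_ hne
        have hc'q : c' = q := by rw [hc'def, if_neg hx, hqc]
        exact hc'q ▸ List.mem_cons_self ..
    · rcases List.mem_cons.mp hq' with hqh | hq''
      · by_cases hx : c.2.2.2 < qh.2.2.2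
        · refine key q ?_ hne
          have hc'q : c' = q := by rw [hc'def, if_pos hx, hqh]
          exact hc'q ▸ List.mem_cons_self ..
        · exact hdrop q (Or.inr ⟨by rw [hc'def, if_neg hx], hqh⟩)
      · exact key q (List.mem_cons_of_mem c' hq'') hne

-- ===== "best job of employer e" and the final identification =====

def pvIsBest (xs : List PvJob) (p : PvP) : Prop :=
  p ∈ PySem.List.enumerate xs ∧
    ∀ q ∈ PySem.List.enumerate xs, pvEmp q = pvEmp p → q = p ∨ pvLex pvK1 pvK2 p q = true

theorem pv_mem_D_iff (xs : List PvJob) (p : PvP) :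
    p ∈ pvSieve (pvT xs) [] ↔ pvIsBest xs p := by
  rw [pv_sieve_mem (pvT xs) [] (pvT_pairwise xs) p]
  have hmem : ∀ q : PvP, q ∈ pvT xs ↔ q ∈ PySem.List.enumerate xs :=
    fun q => (pvT_perm xs).mem_iff
  constructor
  · rintro ⟨hpT, _, hmin⟩
    exact ⟨(hmem p).mp hpT, fun q hq hqe => hmin q ((hmem q).mpr hq) hqe⟩
  · rintro ⟨hpE, hmin⟩
    exact ⟨(hmem p).mpr hpE, rfl, fun q hq hqe => hmin q ((hmem q).mp hq) hqe⟩

theorem pv_isBest_unique (xs : List PvJob) {p p' : PvP}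
    (h : pvIsBest xs p) (h' : pvIsBest xs p') (he : pvEmp p = pvEmp p') : p = p' := by
  rcases h.2 p' h'.1 he.symm with h1 | h1
  · exact h1.symm
  · rcases h'.2 p h.1 he with h2 | h2
    · exact h2
    · exact absurd h2 (fun h2 => pvLex_asymm pvK1 pvK2 h1 h2)

theorem pv_mem_filter (xs : List PvJob) (e : String) (q : PvP) :
    q ∈ (PySem.List.enumerate xs).filter (fun p => pvEmp p == e) ↔
      q ∈ PySem.List.enumerate xs ∧ pvEmp q = e := by
  simp [List.mem_filter]

theorem pv_filter_best (xs : List PvJob) (e : String) {p : PvP} {r : List PvP}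
    (hl : (PySem.List.enumerate xs).filter (fun q => pvEmp q == e) = p :: r) :
    pvIsBest xs (pvSel p r) ∧ pvEmp (pvSel p r) = e := by
  have hpw : ((PySem.List.enumerate xs).filter (fun q => pvEmp q == e)).Pairwise
      (fun a b : PvP => a.1 < b.1) := (pv_enum_pairwise xs 0).filter _
  rw [hl] at hpw
  have hmem : pvSel p r ∈ p :: r := pv_sel_mem r p
  have hmemf : pvSel p r ∈ (PySem.List.enumerate xs).filter (fun q => pvEmp q == e) := by
    rw [hl]; exact hmem
  obtain ⟨hmeme, hempe⟩ := (pv_mem_filter xs e _).mp hmemf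
  refine ⟨⟨hmeme, ?_⟩, hempe⟩
  intro q hq hqe
  by_cases hqm : q = pvSel p r
  · exact Or.inl hqm
  · refine Or.inr (pv_sel_min r p hpw q ?_ hqm)
    have : q ∈ (PySem.List.enumerate xs).filter (fun p => pvEmp p == e) :=
      (pv_mem_filter xs e q).mpr ⟨hq, by rw [hqe, hempe]⟩
    rw [hl] at this; exact this

theorem pv_items_iff (xs : List PvJob) (e : String) (v : PvVal) :
    (e, v) ∈ (pvBuildBest (PySem.List.enumerate xs) PySem.Dict.empty).items ↔
      (e, v) ∈ (pvSieve (pvT xs) []).map pvG := by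
  have hnodup : (pvBuildBest (PySem.List.enumerate xs) PySem.Dict.empty).keys.Nodup :=
    pv_buildBest_keys_nodup _ _ PySem.Dict.nodup_keys_empty
  rw [← PySem.Dict.get?_eq_some_iff_mem_items _ _ _ hnodup]
  rw [pv_buildBest_get?]
  rw [show (PySem.Dict.empty : PySem.Dict String PvVal).get? e = none from rfl]
  constructor
  · intro hget
    cases hl : (PySem.List.enumerate xs).filter (fun p => pvEmp p == e) with
    | nil => rw [hl] at hget; cases hget
    | cons p r =>
      rw [hl, List.foldl_cons] at hget
      rw [show pvUpd none p = some (pvVal p) from rfl] at hget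
      rw [pv_foldl_upd_some] at hget
      obtain ⟨hbest, hemp⟩ := pv_filter_best xs e hl
      have hv : v = pvVal (pvSel p r) := by injection hget with h; exact h.symm
      rw [List.mem_map]
      exact ⟨pvSel p r, (pv_mem_D_iff xs _).mpr hbest, by rw [pvG, hemp, hv]⟩
  · intro hmap
    obtain ⟨m, hmD, hgm⟩ := List.mem_map.mp hmap
    have hbestm : pvIsBest xs m := (pv_mem_D_iff xs m).mp hmD
    have hem : pvEmp m = e := by rw [pvG] at hgm; exact (Prod.mk.injEq ..).mp hgm |>.1
    have hvm : pvVal m = v := by rw [pvG] at hgm; exact (Prod.mk.injEq ..).mp hgm |>.2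
    cases hl : (PySem.List.enumerate xs).filter (fun p => pvEmp p == e) with
    | nil =>
      exfalso
      have : m ∈ (PySem.List.enumerate xs).filter (fun p => pvEmp p == e) :=
        (pv_mem_filter xs e m).mpr ⟨hbestm.1, hem⟩
      rw [hl] at this; cases this
    | cons p r =>
      rw [List.foldl_cons]
      rw [show pvUpd none p = some (pvVal p) from rfl]
      rw [pv_foldl_upd_some]
      obtain ⟨hbest', hemp'⟩ := pv_filter_best xs e hl
      have : pvSel p r = m := pv_isBest_unique xs hbest' hbestm (by rw [hemp', hem])
      rw [this, hvm]

-- ===== the crux: B's ranked list is exactly the sieve of T =====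

theorem pv_ranked_eq (xs : List PvJob) :
    PySem.List.sorted2 (pvBuildBest (PySem.List.enumerate xs) PySem.Dict.empty).items
        (fun kv => -kv.2.1) (fun kv => kv.2.2.1) false =
      (pvSieve (pvT xs) []).map pvG := by
  apply pv_sorted2_eq
  · -- permutation
    have hn1 : ((pvSieve (pvT xs) []).map pvG).Nodup := by
      have h1 : (((pvSieve (pvT xs) []).map pvG).map (·.1)).Nodup := by
        rw [List.map_map]
        exact (pv_sieve_emp_nodup (pvT xs) []).1
      exact h1.of_map
    have hn2 : (pvBuildBest (PySem.List.enumerate xs) PySem.Dict.empty).items.Nodup := by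
      have h1 := pv_buildBest_keys_nodup (PySem.List.enumerate xs) _ PySem.Dict.nodup_keys_empty
      rw [PySem.Dict.keys] at h1
      exact h1.of_map
    rw [List.perm_ext_iff_of_nodup hn1 hn2]
    rintro ⟨e, v⟩
    exact (pv_items_iff xs e v).symm
  · -- strict sortedness
    have hD : (pvSieve (pvT xs) []).Pairwise (fun a b => pvLex pvK1 pvK2 a b = true) :=
      (pvT_pairwise xs).sublist (pv_sieve_sublist (pvT xs) [])
    refine List.pairwise_map.mpr (hD.imp ?_)
    intro a b h
    exact h

-- ===== VERDICT (by name: the statement is the Claim_ definition above) =====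
theorem get_sample_jobs_spec : Claim_equal_get_sample_jobs := by
  intro jobs n _
  show get_sample_jobs jobs n = get_sample_jobs_alt jobs n
  show pvGoA (PySem.List.sorted jobs (fun x => x.2.2) true) n PySem.Set.empty [] =
    pvEmitB (PySem.List.sorted2 (pvBuildBest (PySem.List.enumerate jobs) PySem.Dict.empty).items
      (fun kv => -kv.2.1) (fun kv => kv.2.2.1) false) n []
  rw [pv_stable_sort_T, pv_ranked_eq, pv_goA_eq, pv_emitB_eq]
  rfl
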